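-- pv_equiv track=rewrite | github.com/NobuyukiInoue/LeetCode | Problems/2500_2599/2595_Number_of_Even_and_Odd_Bits/Project_Python3/Number_of_Even_and_Odd_Bits.py | evenOddBit2
-- ===== SOURCE A (Python) =====
-- from typing import List, Dict, Tuple
--
-- def evenOddBit2(n: int) -> List[int]:
--     # 37ms
--     s = bin(n)[2:][::-1]
--     even, odd = 0, 0
--     for i, _ in enumerate(s):
--         if i%2 == 1 and s[i] =='1':
--             odd += 1
--         if i%2 == 0 and s[i] =='1':
--             even += 1
--     return [even, odd]
-- ===== SOURCE B (Python) =====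
-- def evenOddBit2(n: int) -> list:
--     # Recurse two bits at a time: bit 0 sits at an even position, bit 1 at an
--     # odd one, and every bit position of n >> 2 keeps its parity, so the
--     # subproblem's counts add componentwise.
--     if n == 0:
--         return [0, 0]
--     even, odd = evenOddBit2(n >> 2)
--     return [even + (n & 1), odd + ((n >> 1) & 1)]
-- ===== Notes on version B (the rewrite author's own statement) =====
-- stated objective: simpler
-- what changed: B replaces A's indexed scan over the reversed bin(n) string by a position-free recursion that strips two bits per call and adds the subresult componentwise.
-- outside the precondition, e.g. on evenOddBit2(-5): A returns [2, 0], B does not finish within the time limit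
import Mathlib
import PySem

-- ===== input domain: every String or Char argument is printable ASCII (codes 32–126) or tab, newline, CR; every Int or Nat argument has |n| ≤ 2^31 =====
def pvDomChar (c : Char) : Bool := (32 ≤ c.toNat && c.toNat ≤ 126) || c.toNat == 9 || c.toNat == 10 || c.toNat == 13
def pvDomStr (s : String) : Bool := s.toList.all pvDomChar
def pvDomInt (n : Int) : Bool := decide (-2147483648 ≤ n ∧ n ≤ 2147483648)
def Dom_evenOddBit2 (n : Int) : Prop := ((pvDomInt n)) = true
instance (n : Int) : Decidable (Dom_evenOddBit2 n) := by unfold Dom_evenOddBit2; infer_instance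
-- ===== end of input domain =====

-- B replaces A's bin(n)[2:][::-1] string scan by a position-free two-bits-per-call recursion (simpler).


-- ===== PORT A =====
-- binary digits of m, most significant first ([] for m = 0); fuel only makes the
-- repeated halving structural (never exhausted when m ≤ fuel)
def pvBinDigitsAux : Nat → Nat → List Char
  | 0, _ => []
  | fuel + 1, m =>
    if m = 0 then [] else pvBinDigitsAux fuel (m / 2) ++ [if m % 2 = 1 then '1' else '0']

-- Python's bin(n), as a character list
def pvBin (n : Int) : List Char :=
  if n = 0 then ['0', 'b', '0']
  else if n < 0 then '-' :: '0' :: 'b' :: pvBinDigitsAux (-n).toNat (-n).toNat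
  else '0' :: 'b' :: pvBinDigitsAux n.toNat n.toNat

-- loop body of A: the two ifs, in source order, indexing s[i]
def pvStepA (s : List Char) (eo : Int × Int) (p : Int × Char) : Int × Int :=
  let eo1 := if p.1 % 2 = 1 ∧ PySem.List.pyGetD s p.1 ' ' = '1' then (eo.1, eo.2 + 1) else eo
  if p.1 % 2 = 0 ∧ PySem.List.pyGetD s p.1 ' ' = '1' then (eo1.1 + 1, eo1.2) else eo1

def evenOddBit2 (n : Int) : List Int :=
  -- s = bin(n)[2:][::-1]  ([::-1] is reverse)
  let s := (PySem.List.slice (pvBin n) (some 2) none).reverse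
  let eo := (PySem.List.enumerate s 0).foldl (pvStepA s) (0, 0)
  [eo.1, eo.2]

-- ===== PORT B =====
-- Source B's recursion. For the positive divisors used here Lean's Euclidean `/`,`%`
-- coincide with Python's floor division, so n >> 2 = n / 4, n & 1 = n % 2,
-- (n >> 1) & 1 = (n / 2) % 2 exactly. Python's `if n == 0` base case is widened
-- to n ≤ 0 only to make the recursion total (Python does not return for n < 0,
-- which Pre_ excludes).
def pvRecB (n : Int) : Int × Int :=
  if h : 0 < n then
    let p := pvRecB (n / 4)
    (p.1 + n % 2, p.2 + (n / 2) % 2)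
  else (0, 0)
termination_by n.toNat
decreasing_by omega

def evenOddBit2_alt (n : Int) : List Int :=
  let p := pvRecB n
  [p.1, p.2]

-- ===== PRECONDITION & SPEC =====
-- Pre_ excludes negative n: there A slices '-0b…' and counts the characters of 'b' + the binary
-- digits of |n| (an artefact of the string representation), while B's recursion does not terminate.
def Pre_evenOddBit2 (n : Int) : Prop := 0 ≤ n
instance (n : Int) : Decidable (Pre_evenOddBit2 n) := by unfold Pre_evenOddBit2; infer_instance
def pvWitness_evenOddBit2 : Int := (10)
def Spec_evenOddBit2 (n : Int) (out : List Int) : Prop := out = evenOddBit2_alt n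
instance (n : Int) (out : List Int) : Decidable (Spec_evenOddBit2 n out) := by unfold Spec_evenOddBit2; infer_instance

-- ===== CLAIM (what is proved, stated in full; the proofs are below) =====
def Claim_equal_evenOddBit2 : Prop := ∀ (n : Int), Dom_evenOddBit2 n → Pre_evenOddBit2 n → Spec_evenOddBit2 n (evenOddBit2 n)

-- ===== LEMMAS AND PROOFS =====

-- pure form of A's loop body (uses the enumerated character instead of re-indexing s)
def pvStepC (eo : Int × Int) (p : Int × Char) : Int × Int :=
  let eo1 := if p.1 % 2 = 1 ∧ p.2 = '1' then (eo.1, eo.2 + 1) else eo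
  if p.1 % 2 = 0 ∧ p.2 = '1' then (eo1.1 + 1, eo1.2) else eo1

theorem pvStepA_eq_C (s : List Char) :
    (PySem.List.enumerate s 0).foldl (pvStepA s) (0, 0) =
    (PySem.List.enumerate s 0).foldl pvStepC (0, 0) := by
  apply PySem.List.foldl_congr_mem
  intro acc p hp
  rw [PySem.List.mem_enumerate_iff] at hp
  obtain ⟨k, hk, rfl⟩ := hp
  simp [pvStepA, pvStepC, PySem.List.pyGetD_natCast, List.getD_eq_getElem?_getD, hk]

-- LSB-first reference loop: one bit per step, tracking the position index i
def pvLoop : Nat → Int → Int → Int → Int → Int × Int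
  | 0, _, _, even, odd => (even, odd)
  | fuel + 1, n, i, even, odd =>
    if 0 < n then
      if n % 2 = 1 then
        if i % 2 = 0 then pvLoop fuel (n / 2) (i + 1) (even + 1) odd
        else pvLoop fuel (n / 2) (i + 1) even (odd + 1)
      else pvLoop fuel (n / 2) (i + 1) even odd
    else (even, odd)

theorem pvRecB_zero : pvRecB 0 = (0, 0) := by rw [pvRecB]; simp

-- shifting one bit swaps the parity roles and re-adds the lowest bit
theorem pvRecB_shift : ∀ m : Nat,
    pvRecB (m : Int) = ((m : Int) % 2 + (pvRecB ((m : Int) / 2)).2, (pvRecB ((m : Int) / 2)).1) := by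
  intro m
  induction m using Nat.strong_induction_on with
  | _ m ih =>
    by_cases hm : m = 0
    · subst hm; simp [pvRecB_zero]
    · have hmpos : (0 : Int) < (m : Int) := by exact_mod_cast Nat.pos_of_ne_zero hm
      rw [pvRecB, dif_pos hmpos]
      by_cases h2 : m / 2 = 0
      · -- m = 1
        have : m = 1 := by omega
        subst this
        norm_num [pvRecB_zero]
      · have h2pos : (0 : Int) < (m : Int) / 2 := by omega
        conv_rhs => rw [pvRecB, dif_pos h2pos]
        have e4 : (m : Int) / 4 = ((m / 4 : Nat) : Int) := by omega
        have e24 : (m : Int) / 2 / 4 = ((m / 8 : Nat) : Int) := by omega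
        have e22 : (m : Int) / 2 / 2 = (m : Int) / 4 := by omega
        have ih4 := ih (m / 4) (by omega)
        have e42 : ((m / 4 : Nat) : Int) / 2 = ((m / 8 : Nat) : Int) := by omega
        rw [e4, ih4, e42]
        simp only [e24, e22, e4, Prod.mk.injEq]
        exact ⟨by ring, trivial⟩

theorem pvLoop_rec (f : Nat) : ∀ (m : Nat) (i even odd : Int), m ≤ f →
    pvLoop f (m : Int) i even odd =
      if i % 2 = 0 then (even + (pvRecB (m : Int)).1, odd + (pvRecB (m : Int)).2)
      else (even + (pvRecB (m : Int)).2, odd + (pvRecB (m : Int)).1) := by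
  induction f with
  | zero =>
    intro m i even odd hf
    have : m = 0 := by omega
    subst this
    simp [pvLoop, pvRecB_zero]
  | succ f ih =>
    intro m i even odd hf
    by_cases hm : m = 0
    · subst hm; simp [pvLoop, pvRecB_zero]
    · have hmpos : (0 : Int) < (m : Int) := by exact_mod_cast Nat.pos_of_ne_zero hm
      have hd : (m : Int) / 2 = ((m / 2 : Nat) : Int) := by omega
      have hs := pvRecB_shift m
      show (if 0 < (m:Int) then
          if (m:Int) % 2 = 1 then
            if i % 2 = 0 then pvLoop f ((m:Int) / 2) (i + 1) (even + 1) odd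
            else pvLoop f ((m:Int) / 2) (i + 1) even (odd + 1)
          else pvLoop f ((m:Int) / 2) (i + 1) even odd
        else (even, odd)) = _
      rw [if_pos hmpos, hd]
      by_cases hb : (m : Int) % 2 = 1
      · rw [if_pos hb]
        by_cases hi : i % 2 = 0
        · rw [if_pos hi, ih (m / 2) (i + 1) (even + 1) odd (by omega),
            if_neg (by omega : ¬ (i + 1) % 2 = 0), if_pos hi, ← hd]
          rw [Prod.ext_iff] at hs ⊢
          constructor <;> [skip; skip] <;> simp only [hs.1, hs.2] <;> omega
        · rw [if_neg hi, ih (m / 2) (i + 1) even (odd + 1) (by omega),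
            if_pos (by omega : (i + 1) % 2 = 0), if_neg hi, ← hd]
          rw [Prod.ext_iff] at hs ⊢
          constructor <;> simp only [hs.1, hs.2] <;> omega
      · rw [if_neg hb, ih (m / 2) (i + 1) even odd (by omega), ← hd]
        rw [Prod.ext_iff] at hs ⊢
        by_cases hi : i % 2 = 0
        · rw [if_neg (by omega : ¬ (i + 1) % 2 = 0), if_pos hi]
          constructor <;> simp only [hs.1, hs.2] <;> omega
        · rw [if_pos (by omega : (i + 1) % 2 = 0), if_neg hi]
          constructor <;> simp only [hs.1, hs.2] <;> omega

-- A's enumerate-fold over the reversed digit string equals the LSB-first loop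
theorem pvMain (f : Nat) : ∀ (m : Nat) (i even odd : Int), m ≤ f →
    (PySem.List.enumerate (pvBinDigitsAux f m).reverse i).foldl pvStepC (even, odd) =
    pvLoop f (m : Int) i even odd := by
  induction f with
  | zero =>
    intro m i even odd hf
    have : m = 0 := by omega
    subst this
    simp [pvBinDigitsAux, pvLoop, PySem.List.enumerate_nil]
  | succ f ih =>
    intro m i even odd hf
    by_cases hm : m = 0
    · subst hm
      simp [pvBinDigitsAux, pvLoop, PySem.List.enumerate_nil]
    · have hm' : (0:Int) < (m:Int) := by exact_mod_cast Nat.pos_of_ne_zero hm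
      have hd : ((m:Int)) / 2 = ((m / 2 : Nat) : Int) := by omega
      rw [pvBinDigitsAux, if_neg hm]
      show (PySem.List.enumerate _ i).foldl pvStepC (even, odd) =
        pvLoop (f + 1) (m : Int) i even odd
      rw [show pvLoop (f + 1) (m : Int) i even odd =
        if 0 < (m:Int) then
          if (m:Int) % 2 = 1 then
            if i % 2 = 0 then pvLoop f ((m:Int) / 2) (i + 1) (even + 1) odd
            else pvLoop f ((m:Int) / 2) (i + 1) even (odd + 1)
          else pvLoop f ((m:Int) / 2) (i + 1) even odd
        else (even, odd) from rfl]
      simp only [List.reverse_append, List.reverse_singleton, List.singleton_append,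
        PySem.List.enumerate_cons, List.foldl_cons]
      rw [if_pos hm', hd]
      by_cases hb : m % 2 = 1
      · have hc : (if m % 2 = 1 then '1' else '0') = '1' := by rw [if_pos hb]
        rw [if_pos (by omega : (m : Int) % 2 = 1)]
        by_cases hi : i % 2 = 0
        · rw [if_pos hi, ← ih (m / 2) (i + 1) (even + 1) odd (by omega)]
          simp [pvStepC, hc, hi]
        · rw [if_neg hi, ← ih (m / 2) (i + 1) even (odd + 1) (by omega)]
          simp [pvStepC, hc, (by omega : i % 2 = 1)]
      · have hc : (if m % 2 = 1 then '1' else '0') = '0' := by rw [if_neg hb]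
        rw [if_neg (by omega : ¬ (m : Int) % 2 = 1),
          ← ih (m / 2) (i + 1) even odd (by omega)]
        simp [pvStepC, hc]

-- ===== VERDICT (by name: the statement is the Claim_ definition above) =====
theorem evenOddBit2_spec : Claim_equal_evenOddBit2 := by
  intro n _ hpre
  unfold Spec_evenOddBit2
  by_cases h0 : n = 0
  · subst h0
    show evenOddBit2 0 = evenOddBit2_alt 0
    rw [show evenOddBit2_alt 0 = [0, 0] by simp [evenOddBit2_alt, pvRecB_zero]]
    decide
  · have hpos : 0 < n := lt_of_le_of_ne hpre (Ne.symm h0)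
    have hbin : pvBin n = '0' :: 'b' :: pvBinDigitsAux n.toNat n.toNat := by
      rw [pvBin, if_neg h0, if_neg (by omega)]
    unfold evenOddBit2 evenOddBit2_alt
    rw [hbin, PySem.List.slice_from _ (by omega : (0:Int) ≤ 2)]
    rw [show Int.toNat 2 = 2 from rfl]
    simp only [List.drop_succ_cons, List.drop_zero]
    rw [pvStepA_eq_C, pvMain n.toNat n.toNat 0 0 0 le_rfl,
      pvLoop_rec n.toNat n.toNat 0 0 0 le_rfl,
      show ((n.toNat : Nat) : Int) = n by omega]
    simp
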